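-- pv_equiv track=rewrite | github.com/Taapeli/stk-upload | app/bp/dupsearch/models/search.py | compute_match
-- ===== SOURCE A (Python) =====
-- def getvalue(searchkeys, prefix):
--     valueset = set()
--     for key in searchkeys:
--         if key.startswith(prefix): valueset.add( key[len(prefix):] )
--     if len(valueset) == 0:
--         return None
--     else:
--         return valueset
--
-- def compute_match(searchkey1,searchkey2):
--     keys1 = searchkey1.split()
--     keys2 = searchkey2.split()
--     matchvalues = []
--     for prefix in (
--         'G','L','X',
--         'EBirthD','EBirthY','EBirthP',
--         'EDeathD','EDeathY','EDeathP',
--     ):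
--         value1 = getvalue(keys1,prefix)
--         value2 = getvalue(keys2,prefix)
--         value = 1 if value1 and value2 and value1 == value2 else 0
--         matchvalues.append(value)
--
--         value1 = getvalue(keys1,"Parent"+prefix)
--         value2 = getvalue(keys2,"Parent"+prefix)
--         value = 1 if value1 and value2 and value1 == value2 else 0
--         matchvalues.append(value)
--     return tuple(matchvalues)
-- ===== SOURCE B (Python) =====
-- _PREFIXES = (
--     'G', 'ParentG', 'L', 'ParentL', 'X', 'ParentX',
--     'EBirthD', 'ParentEBirthD', 'EBirthY', 'ParentEBirthY', 'EBirthP', 'ParentEBirthP',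
--     'EDeathD', 'ParentEDeathD', 'EDeathY', 'ParentEDeathY', 'EDeathP', 'ParentEDeathP',
-- )
--
-- def _buckets(searchkey):
--     # one pass over the keys: each key lands in at most one prefix bucket
--     # (no prefix in _PREFIXES is a prefix of another)
--     d = {}
--     for key in searchkey.split():
--         for p in _PREFIXES:
--             if key.startswith(p):
--                 d.setdefault(p, set()).add(key[len(p):])
--                 break
--     return d
--
-- def compute_match(searchkey1, searchkey2):
--     d1 = _buckets(searchkey1)
--     d2 = _buckets(searchkey2)
--     return tuple(
--         1 if p in d1 and p in d2 and d1[p] == d2[p] else 0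
--         for p in _PREFIXES
--     )
-- ===== Notes on version B (the rewrite author's own statement) =====
-- stated objective: alternative
-- what changed: A rescans the whole split key list 18 times (once per prefix, building a set each time); B makes a single grouping pass that buckets every key under its unique matching prefix into one dict per argument and then reads the 18 match indicators off the two dicts.
import Mathlib
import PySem

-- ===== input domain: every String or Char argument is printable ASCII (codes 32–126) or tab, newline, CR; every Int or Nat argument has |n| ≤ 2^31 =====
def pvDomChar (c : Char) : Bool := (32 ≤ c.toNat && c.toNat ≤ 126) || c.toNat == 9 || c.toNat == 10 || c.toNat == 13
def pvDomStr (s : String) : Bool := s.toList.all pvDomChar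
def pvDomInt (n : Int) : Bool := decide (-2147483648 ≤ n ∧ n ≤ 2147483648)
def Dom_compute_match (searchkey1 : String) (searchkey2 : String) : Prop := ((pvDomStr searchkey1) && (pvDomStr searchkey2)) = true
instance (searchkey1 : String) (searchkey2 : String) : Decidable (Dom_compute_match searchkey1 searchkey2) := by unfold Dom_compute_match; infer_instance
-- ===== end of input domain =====

-- B replaces A's 18 full scans of the key list (one per prefix) by a single grouping pass
-- that buckets each key under its unique matching prefix, then reads the 18 answers off the
-- two bucket dicts (objective: one pass over the keys instead of 18).


-- ===== PORT A =====
-- getvalue(searchkeys, prefix): key[len(prefix):] is ported as drop (exact: a nonnegative-start slice clamps)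
def pvGetvalue (searchkeys : List String) (pre : String) : Option (PySem.Set String) :=
  let valueset := searchkeys.foldl (fun vs key =>
    if PySem.Str.startswith key pre
    then PySem.Set.add vs (String.ofList (key.toList.drop pre.toList.length))
    else vs) PySem.Set.empty
  if PySem.Set.len valueset = 0 then none else some valueset

-- 'value1 and value2 and value1 == value2': getvalue returns None or a NONEMPTY (truthy) set,
-- so the condition is exactly: both are some and the sets are equal as sets
def pvMatchVal (v1 v2 : Option (PySem.Set String)) : Int :=
  match v1, v2 with
  | some s1, some s2 => if PySem.Set.equal s1 s2 then 1 else 0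
  | _, _ => 0

def compute_match (searchkey1 : String) (searchkey2 : String) : List Int :=
  let keys1 := PySem.Str.split₀ searchkey1
  let keys2 := PySem.Str.split₀ searchkey2
  (["G", "L", "X", "EBirthD", "EBirthY", "EBirthP", "EDeathD", "EDeathY", "EDeathP"]).foldl
    (fun matchvalues pre =>
      let matchvalues := matchvalues ++ [pvMatchVal (pvGetvalue keys1 pre) (pvGetvalue keys2 pre)]
      -- "Parent" + prefix, ported as list-level concatenation (exact)
      let ppre := String.ofList ("Parent".toList ++ pre.toList)
      matchvalues ++ [pvMatchVal (pvGetvalue keys1 ppre) (pvGetvalue keys2 ppre)]) []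

-- ===== PORT B =====
def pvPrefixes : List String :=
  ["G", "ParentG", "L", "ParentL", "X", "ParentX",
   "EBirthD", "ParentEBirthD", "EBirthY", "ParentEBirthY", "EBirthP", "ParentEBirthP",
   "EDeathD", "ParentEDeathD", "EDeathY", "ParentEDeathY", "EDeathP", "ParentEDeathP"]

-- inner loop 'for p in _PREFIXES: if key.startswith(p): d.setdefault(p, set()).add(key[len(p):]); break'
def pvBucketsInner (d : PySem.Dict String (PySem.Set String)) (key : String) :
    List String → PySem.Dict String (PySem.Set String)
  | [] => d
  | p :: ps =>
    if PySem.Str.startswith key p then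
      d.insert p (PySem.Set.add (d.getD p PySem.Set.empty) (String.ofList (key.toList.drop p.toList.length)))
    else pvBucketsInner d key ps

def pvBuckets (searchkey : String) : PySem.Dict String (PySem.Set String) :=
  (PySem.Str.split₀ searchkey).foldl (fun d key => pvBucketsInner d key pvPrefixes) PySem.Dict.empty

def compute_match_alt (searchkey1 : String) (searchkey2 : String) : List Int :=
  let d1 := pvBuckets searchkey1
  let d2 := pvBuckets searchkey2
  pvPrefixes.map (fun p =>
    match d1.get? p, d2.get? p with
    | some v1, some v2 => if PySem.Set.equal v1 v2 then 1 else 0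
    | _, _ => 0)

-- ===== PRECONDITION & SPEC =====
def Spec_compute_match (searchkey1 : String) (searchkey2 : String) (out : List Int) : Prop := out = compute_match_alt searchkey1 searchkey2
instance (searchkey1 : String) (searchkey2 : String) (out : List Int) : Decidable (Spec_compute_match searchkey1 searchkey2 out) := by unfold Spec_compute_match; infer_instance

-- ===== CLAIM (what is proved, stated in full; the proofs are below) =====
def Claim_equal_compute_match : Prop := ∀ (searchkey1 : String) (searchkey2 : String), Dom_compute_match searchkey1 searchkey2 → Spec_compute_match searchkey1 searchkey2 (compute_match searchkey1 searchkey2)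

-- ===== LEMMAS AND PROOFS =====

-- no prefix in pvPrefixes is a prefix of another
lemma pvNocop : ∀ p ∈ pvPrefixes, ∀ q ∈ pvPrefixes, p ≠ q → ¬ (p.toList <+: q.toList) := by decide

lemma pvStartswith_prefix {k p : String} (h : PySem.Str.startswith k p = true) :
    p.toList <+: k.toList := by simpa [PySem.Chars.startswith_iff] using h

-- a key starts with at most one element of pvPrefixes
lemma pvUnique {k p q : String} (hp : p ∈ pvPrefixes) (hq : q ∈ pvPrefixes)
    (h1 : PySem.Str.startswith k p = true) (h2 : PySem.Str.startswith k q = true) : p = q := by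
  by_contra hne
  rcases List.prefix_or_prefix_of_prefix (pvStartswith_prefix h1) (pvStartswith_prefix h2) with h | h
  · exact pvNocop p hp q hq hne h
  · exact pvNocop q hq p hp (Ne.symm hne) h

lemma pvSet_add_ne_nil (s : PySem.Set String) (x : String) : PySem.Set.add s x ≠ [] := by
  rcases s with _ | ⟨a, t⟩
  · simp [PySem.Set.add]
  · simp only [PySem.Set.add]
    split <;> simp

lemma pvBucketsInner_get?_of_not (d : PySem.Dict String (PySem.Set String)) (k p : String)
    (h : ¬ PySem.Str.startswith k p = true) :
    ∀ L, (pvBucketsInner d k L).get? p = d.get? p := by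
  intro L
  induction L with
  | nil => rfl
  | cons q L ih =>
    by_cases hq : PySem.Str.startswith k q = true
    · have hne : p ≠ q := by rintro rfl; exact h hq
      simp only [pvBucketsInner]
      rw [if_pos hq, PySem.Dict.get?_insert_of_ne _ _ hne]
    · simp only [pvBucketsInner]
      rw [if_neg hq]
      exact ih

lemma pvBucketsInner_get?_of_yes (d : PySem.Dict String (PySem.Set String)) (k p : String)
    (hp : p ∈ pvPrefixes) (h : PySem.Str.startswith k p = true) :
    ∀ L, p ∈ L → (∀ q ∈ L, q ∈ pvPrefixes) →
    (pvBucketsInner d k L).get? p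
      = some (PySem.Set.add (d.getD p PySem.Set.empty)
          (String.ofList (k.toList.drop p.toList.length))) := by
  intro L
  induction L with
  | nil => intro hmem; exact absurd hmem (List.not_mem_nil)
  | cons q L ih =>
    intro hmem hsub
    by_cases hq : PySem.Str.startswith k q = true
    · have : q = p := pvUnique (hsub q (List.mem_cons_self)) hp hq h
      subst this
      simp only [pvBucketsInner]
      rw [if_pos hq, PySem.Dict.get?_insert_self]
    · have hne : p ≠ q := by rintro rfl; exact hq h
      have hmem' : p ∈ L := by
        rcases List.mem_cons.mp hmem with rfl | h'
        · exact absurd rfl hne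
        · exact h'
      simp only [pvBucketsInner]
      rw [if_neg hq]
      exact ih hmem' (fun r hr => hsub r (List.mem_cons_of_mem _ hr))

-- invariant of the grouping fold: for every prefix, B's bucket is exactly A's per-prefix set
-- (absent iff that set is empty)
lemma pvBuckets_fold (ks : List String) :
    ∀ (d : PySem.Dict String (PySem.Set String)) (g : String → PySem.Set String),
    (∀ p ∈ pvPrefixes, d.get? p = if g p = [] then none else some (g p)) →
    ∀ p ∈ pvPrefixes,
    (ks.foldl (fun d key => pvBucketsInner d key pvPrefixes) d).get? p
      = (fun s => if s = [] then none else some s)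
        (ks.foldl (fun vs key =>
            if PySem.Str.startswith key p
            then PySem.Set.add vs (String.ofList (key.toList.drop p.toList.length))
            else vs) (g p)) := by
  induction ks with
  | nil => intro d g hg p hp; exact hg p hp
  | cons k ks ih =>
    intro d g hg p hp
    have hgetD : ∀ q ∈ pvPrefixes, d.getD q PySem.Set.empty = g q := by
      intro q hq
      rw [PySem.Dict.getD_eq_get?_getD, hg q hq]
      by_cases h0 : g q = []
      · rw [if_pos h0, h0]; rfl
      · rw [if_neg h0]; rfl
    simp only [List.foldl_cons]
    refine ih (pvBucketsInner d k pvPrefixes)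
      (fun q => if PySem.Str.startswith k q
        then PySem.Set.add (g q) (String.ofList (k.toList.drop q.toList.length)) else g q)
      ?_ p hp
    intro q hq
    beta_reduce
    by_cases hs : PySem.Str.startswith k q = true
    · rw [pvBucketsInner_get?_of_yes d k q hq hs pvPrefixes hq (fun _ h => h), hgetD q hq,
        if_pos hs, if_neg (pvSet_add_ne_nil (g q) _)]
    · rw [pvBucketsInner_get?_of_not d k q hs pvPrefixes, if_neg hs]
      exact hg q hq

-- per-prefix agreement of the two programs' match indicator
lemma pvPoint (searchkey1 searchkey2 : String) (p : String) (hp : p ∈ pvPrefixes) :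
    (match (pvBuckets searchkey1).get? p, (pvBuckets searchkey2).get? p with
     | some v1, some v2 => if PySem.Set.equal v1 v2 then (1 : Int) else 0
     | _, _ => 0)
    = pvMatchVal (pvGetvalue (PySem.Str.split₀ searchkey1) p)
        (pvGetvalue (PySem.Str.split₀ searchkey2) p) := by
  have h1 := pvBuckets_fold (PySem.Str.split₀ searchkey1) PySem.Dict.empty (fun _ => [])
    (by intro q _; rw [if_pos rfl]; rfl) p hp
  have h2 := pvBuckets_fold (PySem.Str.split₀ searchkey2) PySem.Dict.empty (fun _ => [])
    (by intro q _; rw [if_pos rfl]; rfl) p hp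
  simp only [pvBuckets, h1, h2, pvGetvalue, pvMatchVal, PySem.Set.len,
    show PySem.Set.empty = ([] : List String) from rfl, Nat.cast_eq_zero, List.length_eq_zero_iff]

-- ===== VERDICT (by name: the statement is the Claim_ definition above) =====
theorem compute_match_spec : Claim_equal_compute_match := by
  intro s1 s2 _
  unfold Spec_compute_match compute_match compute_match_alt
  simp only [List.foldl_cons, List.foldl_nil, List.map, pvPrefixes, List.nil_append,
    List.cons_append, List.append_assoc,
    show String.ofList ("Parent".toList ++ "G".toList) = "ParentG" from rfl,
    show String.ofList ("Parent".toList ++ "L".toList) = "ParentL" from rfl,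
    show String.ofList ("Parent".toList ++ "X".toList) = "ParentX" from rfl,
    show String.ofList ("Parent".toList ++ "EBirthD".toList) = "ParentEBirthD" from rfl,
    show String.ofList ("Parent".toList ++ "EBirthY".toList) = "ParentEBirthY" from rfl,
    show String.ofList ("Parent".toList ++ "EBirthP".toList) = "ParentEBirthP" from rfl,
    show String.ofList ("Parent".toList ++ "EDeathD".toList) = "ParentEDeathD" from rfl,
    show String.ofList ("Parent".toList ++ "EDeathY".toList) = "ParentEDeathY" from rfl,
    show String.ofList ("Parent".toList ++ "EDeathP".toList) = "ParentEDeathP" from rfl,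
    pvPoint s1 s2 "G" (by decide), pvPoint s1 s2 "ParentG" (by decide),
    pvPoint s1 s2 "L" (by decide), pvPoint s1 s2 "ParentL" (by decide),
    pvPoint s1 s2 "X" (by decide), pvPoint s1 s2 "ParentX" (by decide),
    pvPoint s1 s2 "EBirthD" (by decide), pvPoint s1 s2 "ParentEBirthD" (by decide),
    pvPoint s1 s2 "EBirthY" (by decide), pvPoint s1 s2 "ParentEBirthY" (by decide),
    pvPoint s1 s2 "EBirthP" (by decide), pvPoint s1 s2 "ParentEBirthP" (by decide),
    pvPoint s1 s2 "EDeathD" (by decide), pvPoint s1 s2 "ParentEDeathD" (by decide),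
    pvPoint s1 s2 "EDeathY" (by decide), pvPoint s1 s2 "ParentEDeathY" (by decide),
    pvPoint s1 s2 "EDeathP" (by decide), pvPoint s1 s2 "ParentEDeathP" (by decide)]
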